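-- pv_equiv track=rewrite | github.com/elifdikmn/DataPrivacy | backend/llm_handler.py | build_taxonomy
-- ===== SOURCE A (Python) =====
-- from typing import List, Dict, Any, Tuple, Optional
-- from collections import Counter, defaultdict
--
-- def build_taxonomy(rows: List[Dict[str, Any]]) -> Dict[str, Counter]:
--     tax = defaultdict(Counter)
--     for r in rows:
--         m = (r.get("main_data_type") or "Other").strip()
--         d = (r.get("data_type") or "").strip()
--         if d:
--             tax[m][d] += 1
--     return tax
-- ===== SOURCE B (Python) =====
-- from typing import List, Dict, Any
-- from collections import Counter, defaultdict
--
-- def build_taxonomy(rows: List[Dict[str, Any]]) -> Dict[str, Counter]: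
--     # Normalize once; keep only rows with a non-empty data type.
--     pairs = [p for p in (((r.get("main_data_type") or "Other").strip(),
--                           (r.get("data_type") or "").strip()) for r in rows)
--              if p[1]]
--     # Count-by-distinct-keys: no incremental counter anywhere — for each
--     # distinct main type (first-occurrence order) take its data types and
--     # count each distinct one with a direct ds.count(d) scan.
--     tax = defaultdict(Counter)
--     for m in dict.fromkeys(m for m, _ in pairs):
--         ds = [d for mm, d in pairs if mm == m]
--         tax[m] = Counter({d: ds.count(d) for d in dict.fromkeys(ds)})
--     return tax
-- ===== Notes on version B (the rewrite author's own statement) =====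
-- stated objective: alternative
-- what changed: Replaces A's single fused per-row nested-counter increment loop with a count-by-distinct-keys algorithm: extract the normalized pairs once, then for each distinct main type select its data types and compute every distinct data type's frequency by a direct ds.count(d) scan, with no incremental counter anywhere.
import Mathlib
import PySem

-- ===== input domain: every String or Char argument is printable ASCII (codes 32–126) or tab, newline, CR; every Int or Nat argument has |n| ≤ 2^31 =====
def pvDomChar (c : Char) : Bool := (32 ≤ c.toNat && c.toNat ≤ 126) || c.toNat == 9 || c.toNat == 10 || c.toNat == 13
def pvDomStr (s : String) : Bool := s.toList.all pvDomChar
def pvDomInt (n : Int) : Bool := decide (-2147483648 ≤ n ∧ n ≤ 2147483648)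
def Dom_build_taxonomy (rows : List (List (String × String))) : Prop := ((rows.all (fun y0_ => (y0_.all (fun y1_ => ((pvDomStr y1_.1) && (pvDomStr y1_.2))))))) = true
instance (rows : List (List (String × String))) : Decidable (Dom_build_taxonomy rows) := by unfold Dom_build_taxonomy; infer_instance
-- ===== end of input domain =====

-- B replaces A's fused per-row nested-counter increment loop with a count-by-distinct-keys
-- algorithm (for each distinct main type, count each distinct data type by a direct scan);
-- alternative structure, not claimed faster.

-- shared row normalization (both Pythons compute m and d by the same expressions)
-- r.get(k): first-match lookup in the association list representing the dict
def pvRowGet (r : List (String × String)) (k : String) : Option String :=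
  (r.find? (fun p => p.1 == k)).map (·.2)

-- (r.get("main_data_type") or "Other").strip()  ('or' replaces None and "" alike)
def pvMain (r : List (String × String)) : String :=
  PySem.Str.strip (match pvRowGet r "main_data_type" with
    | some s => if s = "" then "Other" else s
    | none => "Other")

-- (r.get("data_type") or "").strip()
def pvData (r : List (String × String)) : String :=
  PySem.Str.strip ((pvRowGet r "data_type").getD "")

-- ===== PORT A =====
def build_taxonomy (rows : List (List (String × String))) : List (String × List (String × Int)) :=
  let tax := rows.foldl (fun tax r =>
      let m := pvMain r
      let d := pvData r
      if d ≠ "" then tax.modify m PySem.Dict.empty (fun c => c.modify d 0 (· + 1)) else tax)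
    (PySem.Dict.empty : PySem.Dict String (PySem.Dict String Int))
  tax.items.map (fun p => (p.1, p.2.items))

-- ===== PORT B =====
def build_taxonomy_alt (rows : List (List (String × String))) : List (String × List (String × Int)) :=
  let pairs := (rows.map (fun r => (pvMain r, pvData r))).filter (fun p => p.2 ≠ "")
  let tax := (PySem.List.dedup (pairs.map (·.1))).foldl (fun o m =>
      let ds := (pairs.filter (fun p => p.1 == m)).map (·.2)
      o.insert m (PySem.Dict.ofList ((PySem.List.dedup ds).map (fun d => (d, (ds.count d : Int))))))
    (PySem.Dict.empty : PySem.Dict String (PySem.Dict String Int))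
  tax.items.map (fun p => (p.1, p.2.items))

-- ===== PRECONDITION & SPEC =====
def Spec_build_taxonomy (rows : List (List (String × String))) (out : List (String × List (String × Int))) : Prop := out = build_taxonomy_alt rows
instance (rows : List (List (String × String))) (out : List (String × List (String × Int))) : Decidable (Spec_build_taxonomy rows out) := by unfold Spec_build_taxonomy; infer_instance

-- ===== CLAIM (what is proved, stated in full; the proofs are below) =====
def Claim_equal_build_taxonomy : Prop := ∀ (rows : List (List (String × String))), Dom_build_taxonomy rows → Spec_build_taxonomy rows (build_taxonomy rows)

-- ===== LEMMAS AND PROOFS =====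

-- the per-pair step of A's loop, over the extracted pairs
def pvStepA (t : PySem.Dict String (PySem.Dict String Int)) (p : String × String) : PySem.Dict String (PySem.Dict String Int) :=
  t.modify p.1 PySem.Dict.empty (fun c => c.modify p.2 0 (· + 1))

def pvPairs (rows : List (List (String × String))) : List (String × String) :=
  (rows.map (fun r => (pvMain r, pvData r))).filter (fun p => p.2 ≠ "")

-- A's fold over rows is the fold of pvStepA over the extracted normalized pairs
theorem foldA_eq_pairs (rows : List (List (String × String))) (t : PySem.Dict String (PySem.Dict String Int)) :
    rows.foldl (fun tax r =>
      let m := pvMain r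
      let d := pvData r
      if d ≠ "" then tax.modify m PySem.Dict.empty (fun c => c.modify d 0 (· + 1)) else tax) t
    = (pvPairs rows).foldl pvStepA t := by
  induction rows generalizing t with
  | nil => rfl
  | cons r rs ih =>
    have hp : pvPairs (r :: rs)
        = (if pvData r ≠ "" then [(pvMain r, pvData r)] else []) ++ pvPairs rs := by
      by_cases h : pvData r ≠ "" <;> simp [pvPairs, h]
    rw [List.foldl_cons, ih, hp]
    by_cases h : pvData r ≠ ""
    · simp [h, pvStepA]
    · simp [h]

-- lookup in A's fold = counting fold over the data types of that main type
theorem getD_foldl_stepA (l : List (String × String)) (t : PySem.Dict String (PySem.Dict String Int)) (m : String) :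
    ((l.foldl pvStepA t).getD m PySem.Dict.empty)
      = ((l.filter (fun p => p.1 == m)).map (·.2)).foldl (fun c d => c.modify d 0 (· + 1)) (t.getD m PySem.Dict.empty) := by
  induction l generalizing t with
  | nil => rfl
  | cons p ps ih =>
    simp only [List.foldl_cons, ih, List.filter_cons]
    by_cases h : m = p.1
    · have hb : (p.1 == m) = true := by simp [h]
      simp [pvStepA, h]
    · have hne : p.1 ≠ m := fun e => h e.symm
      have hb : (p.1 == m) = false := by simp [hne]
      simp [hb, pvStepA, PySem.Dict.getD_modify, h]

theorem build_taxonomy_eq (rows : List (List (String × String))) :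
    build_taxonomy rows = build_taxonomy_alt rows := by
  unfold build_taxonomy build_taxonomy_alt
  simp only [foldA_eq_pairs]
  set L := pvPairs rows with hL
  have hpairs : (rows.map (fun r => (pvMain r, pvData r))).filter (fun p => p.2 ≠ "") = L := by
    simp [hL, pvPairs]
  rw [hpairs]
  set A := L.foldl pvStepA (PySem.Dict.empty : PySem.Dict String (PySem.Dict String Int)) with hA
  -- keys of A's fold: first occurrences of the main types
  have hAkeys : A.keys = PySem.Set.ofList (L.map (·.1)) := by
    rw [hA]
    have := PySem.Dict.keys_foldl_modify_key L (·.1) (PySem.Dict.empty : PySem.Dict String Int)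
      (fun _ p c => c.modify p.2 0 (· + 1)) PySem.Dict.empty
    simpa [pvStepA, PySem.Set.update_nil_left] using this
  have hAnodup : A.keys.Nodup := by
    rw [hAkeys]; exact PySem.Set.nodup_ofList _
  -- B's loop inserts fresh distinct keys: its items are the mapped list
  have hfresh : ((PySem.List.dedup (L.map (·.1))).foldl (fun o m =>
      o.insert m (PySem.Dict.ofList ((PySem.List.dedup ((L.filter (fun p => p.1 == m)).map (·.2))).map
        (fun d => ((d, (((L.filter (fun p => p.1 == m)).map (·.2)).count d : Int)) : String × Int)))))
      (PySem.Dict.empty : PySem.Dict String (PySem.Dict String Int))).items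
      = (PySem.List.dedup (L.map (·.1))).map (fun m =>
          (m, PySem.Dict.ofList ((PySem.List.dedup ((L.filter (fun p => p.1 == m)).map (·.2))).map
            (fun d => ((d, (((L.filter (fun p => p.1 == m)).map (·.2)).count d : Int)) : String × Int))))) := by
    have h1 : ∀ a ∈ PySem.List.dedup (L.map (·.1)),
        (PySem.Dict.empty : PySem.Dict String (PySem.Dict String Int)).contains a = false := by
      intro a _; simp [PySem.Dict.contains_empty]
    have h2 : ((PySem.List.dedup (L.map (·.1))).map id).Nodup := by
      simp
    have := PySem.Dict.items_foldl_insert_fresh (PySem.List.dedup (L.map (·.1))) id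
      (fun m => PySem.Dict.ofList ((PySem.List.dedup ((L.filter (fun p => p.1 == m)).map (·.2))).map
        (fun d => ((d, (((L.filter (fun p => p.1 == m)).map (·.2)).count d : Int)) : String × Int))))
      PySem.Dict.empty h1 h2
    simpa using this
  rw [hfresh]
  rw [PySem.Dict.items_eq_map_keys A hAnodup PySem.Dict.empty, hAkeys]
  simp only [List.map_map, ← PySem.List.dedup_eq_ofList]
  apply List.map_congr_left
  intro m _
  simp only [Function.comp_apply]
  congr 1
  -- per-key values: A's counting fold is Counter of this key's data types;
  -- B's literal dict has the same items by items_counter, once its items list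
  -- is recognized as the fold of inserts over distinct keys.
  set ds := (L.filter (fun p => p.1 == m)).map (·.2) with hds
  have hAget : A.getD m PySem.Dict.empty = PySem.Dict.counter ds := by
    rw [hA, getD_foldl_stepA, PySem.Dict.counter_eq_foldl]
    simp [PySem.Dict.getD_empty, hds]
  rw [hAget, PySem.Dict.items_counter]
  -- B's Dict.ofList over the dedup'd (nodup) keys has exactly that items list
  have hnd : ((PySem.List.dedup ds).map (fun d => ((d, (ds.count d : Int)) : String × Int)) |>.map (·.1)).Nodup := by
    simp [List.map_map, Function.comp_def]
  have hfresh2 : (PySem.Dict.ofList ((PySem.List.dedup ds).map (fun d => ((d, (ds.count d : Int)) : String × Int)))).items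
      = (PySem.List.dedup ds).map (fun d => ((d, (ds.count d : Int)) : String × Int)) := by
    have h1 : ∀ a ∈ (PySem.List.dedup ds).map (fun d => ((d, (ds.count d : Int)) : String × Int)),
        (PySem.Dict.empty : PySem.Dict String Int).contains a.1 = false := by
      intro a _; simp [PySem.Dict.contains_empty]
    have := PySem.Dict.items_foldl_insert_fresh
      ((PySem.List.dedup ds).map (fun d => ((d, (ds.count d : Int)) : String × Int)))
      (·.1) (·.2) PySem.Dict.empty h1 hnd
    simpa [PySem.Dict.ofList] using this
  rw [hfresh2]
  simp [PySem.List.dedup_eq_ofList]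

-- ===== VERDICT (by name: the statement is the Claim_ definition above) =====
theorem build_taxonomy_spec : Claim_equal_build_taxonomy := by
  intro rows _
  unfold Spec_build_taxonomy
  exact build_taxonomy_eq rows
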